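-- pv_equiv track=rewrite | github.com/ftzm/hnefatafl | max_moves_n24_focused.py | per_piece_moves
-- ===== SOURCE A (Python) =====
-- SIZE = 11
--
-- def per_piece_moves(pieces_set):
--     """Return dict of {(r,c): moves} for each piece."""
--     row_pieces = [[] for _ in range(SIZE)]
--     col_pieces = [[] for _ in range(SIZE)]
--     for r, c in pieces_set:
--         row_pieces[r].append(c)
--         col_pieces[c].append(r)
--     for i in range(SIZE):
--         row_pieces[i].sort()
--         col_pieces[i].sort()
--
--     result = {}
--     for r, c in pieces_set:
--         cols = row_pieces[r]
--         idx = cols.index(c)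
--         left = c - (cols[idx-1] + 1) if idx > 0 else c
--         right = (cols[idx+1] - 1) - c if idx < len(cols) - 1 else (SIZE - 1) - c
--         rows = col_pieces[c]
--         idy = rows.index(r)
--         up = r - (rows[idy-1] + 1) if idy > 0 else r
--         down = (rows[idy+1] - 1) - r if idy < len(rows) - 1 else (SIZE - 1) - r
--         result[(r, c)] = left + right + up + down
--     return result
-- ===== SOURCE B (Python) =====
-- SIZE = 11
--
-- def per_piece_moves(pieces_set):
--     """Return dict of {(r,c): moves} for each piece."""
--     row_pieces = [[] for _ in range(SIZE)]
--     col_pieces = [[] for _ in range(SIZE)]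
--     for r, c in pieces_set:
--         row_pieces[r].append(c)
--         col_pieces[c].append(r)
--     result = {}
--     for r, c in pieces_set:
--         left = max((c2 for c2 in row_pieces[r] if c2 < c), default=-1)
--         right = min((c2 for c2 in row_pieces[r] if c2 > c), default=SIZE)
--         up = max((r2 for r2 in col_pieces[c] if r2 < r), default=-1)
--         down = min((r2 for r2 in col_pieces[c] if r2 > r), default=SIZE)
--         result[(r, c)] = (c - left - 1) + (right - c - 1) + (r - up - 1) + (down - r - 1)
--     return result
-- ===== Notes on version B (the rewrite author's own statement) =====
-- stated objective: simpler
-- what changed: B keeps the row/column bucketing but drops the per-bucket sorting and the .index sorted-neighbour lookups entirely: the nearest blocker in each direction is a direct max/min over the bucket and the move count is closed-form arithmetic on those four blockers. …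
-- outside the precondition, e.g. on per_piece_moves({(-8, 0), (3, 0)}): A returns {(-8, 0): 1, (3, 0): 16}, B returns {(-8, 0): 12, (3, 0): 27}
import Mathlib
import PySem

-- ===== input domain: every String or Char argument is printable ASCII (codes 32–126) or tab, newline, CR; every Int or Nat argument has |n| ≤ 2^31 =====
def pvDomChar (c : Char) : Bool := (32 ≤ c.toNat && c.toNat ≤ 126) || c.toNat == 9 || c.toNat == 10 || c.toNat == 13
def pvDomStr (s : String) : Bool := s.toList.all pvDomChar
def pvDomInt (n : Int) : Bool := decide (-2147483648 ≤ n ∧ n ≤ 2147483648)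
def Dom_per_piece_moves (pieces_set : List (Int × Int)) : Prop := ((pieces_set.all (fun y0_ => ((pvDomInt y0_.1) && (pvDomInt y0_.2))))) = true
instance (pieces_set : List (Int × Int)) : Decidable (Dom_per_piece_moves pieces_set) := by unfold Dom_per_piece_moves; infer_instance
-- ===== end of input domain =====

-- B keeps the row/column bucketing but replaces A's per-bucket sorting and sorted-neighbour
-- .index lookups by direct max/min blocker extrema and closed-form arithmetic (simpler).

-- ===== PORT A =====
-- row_pieces[i].append(v): list-of-buckets update (index in range under Pre_)
def bucketAppend (xs : List (List Int)) (i v : Int) : List (List Int) :=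
  PySem.List.pySetD xs i (PySem.List.pyGetD xs i [] ++ [v])

def per_piece_moves (pieces_set : List (Int × Int)) : List (Int × Int × Int) :=
  let row0 := pieces_set.foldl (fun acc p => bucketAppend acc p.1 p.2) (List.replicate 11 ([] : List Int))
  let col0 := pieces_set.foldl (fun acc p => bucketAppend acc p.2 p.1) (List.replicate 11 ([] : List Int))
  let row_pieces := row0.map (fun l => PySem.List.sorted l (fun x => x) false)
  let col_pieces := col0.map (fun l => PySem.List.sorted l (fun x => x) false)
  let result := pieces_set.foldl (fun (d : PySem.Dict (Int × Int) Int) p =>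
    let cols := PySem.List.pyGetD row_pieces p.1 []
    let idx : Int := ((PySem.List.index? cols p.2).getD 0 : Nat)
    let left := if idx > 0 then p.2 - (PySem.List.pyGetD cols (idx - 1) 0 + 1) else p.2
    let right := if idx < (cols.length : Int) - 1 then (PySem.List.pyGetD cols (idx + 1) 0 - 1) - p.2 else (11 - 1) - p.2
    let rows := PySem.List.pyGetD col_pieces p.2 []
    let idy : Int := ((PySem.List.index? rows p.1).getD 0 : Nat)
    let up := if idy > 0 then p.1 - (PySem.List.pyGetD rows (idy - 1) 0 + 1) else p.1
    let down := if idy < (rows.length : Int) - 1 then (PySem.List.pyGetD rows (idy + 1) 0 - 1) - p.1 else (11 - 1) - p.1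
    d.insert (p.1, p.2) (left + right + up + down)) PySem.Dict.empty
  result.items.map (fun q => (q.1.1, q.1.2, q.2))

-- ===== PORT B =====
def per_piece_moves_alt (pieces_set : List (Int × Int)) : List (Int × Int × Int) :=
  let row_pieces := pieces_set.foldl (fun acc p => bucketAppend acc p.1 p.2) (List.replicate 11 ([] : List Int))
  let col_pieces := pieces_set.foldl (fun acc p => bucketAppend acc p.2 p.1) (List.replicate 11 ([] : List Int))
  let result := pieces_set.foldl (fun (d : PySem.Dict (Int × Int) Int) p =>
    let left := PySem.List.maxD ((PySem.List.pyGetD row_pieces p.1 []).filter (fun c2 => decide (c2 < p.2))) (fun x => x) (-1)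
    let right := PySem.List.minD ((PySem.List.pyGetD row_pieces p.1 []).filter (fun c2 => decide (c2 > p.2))) (fun x => x) 11
    let up := PySem.List.maxD ((PySem.List.pyGetD col_pieces p.2 []).filter (fun r2 => decide (r2 < p.1))) (fun x => x) (-1)
    let down := PySem.List.minD ((PySem.List.pyGetD col_pieces p.2 []).filter (fun r2 => decide (r2 > p.1))) (fun x => x) 11
    d.insert (p.1, p.2) ((p.2 - left - 1) + (right - p.2 - 1) + (p.1 - up - 1) + (down - p.1 - 1))) PySem.Dict.empty
  result.items.map (fun q => (q.1.1, q.1.2, q.2))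

-- ===== PRECONDITION & SPEC =====
-- Pre_ excludes: inputs with a coordinate outside [-11, 11) (both versions raise
-- IndexError there, at the same bucket assignment); lists with duplicate pieces
-- (Nodup is the list-level counterpart of the argument being a Python set); and
-- pairs of pieces whose rows or whose columns differ by exactly 11: Python's
-- negative list indexing silently folds such pieces into one bucket, an accidental
-- aliasing no caller relies on, which the two versions resolve differently.
def Pre_per_piece_moves (pieces_set : List (Int × Int)) : Prop :=
  (∀ p ∈ pieces_set, -11 ≤ p.1 ∧ p.1 ≤ 10 ∧ -11 ≤ p.2 ∧ p.2 ≤ 10) ∧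
  pieces_set.Nodup ∧
  (∀ p ∈ pieces_set, ∀ q ∈ pieces_set, p.1 - q.1 ≠ 11 ∧ p.2 - q.2 ≠ 11)
instance (pieces_set : List (Int × Int)) : Decidable (Pre_per_piece_moves pieces_set) := by
  unfold Pre_per_piece_moves; infer_instance

def pvWitness_per_piece_moves : (List (Int × Int)) := [(0, 0), (3, 4), (3, 7), (10, 4)]

def Spec_per_piece_moves (pieces_set : List (Int × Int)) (out : List (Int × Int × Int)) : Prop := out = per_piece_moves_alt pieces_set
instance (pieces_set : List (Int × Int)) (out : List (Int × Int × Int)) : Decidable (Spec_per_piece_moves pieces_set out) := by unfold Spec_per_piece_moves; infer_instance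

-- ===== CLAIM (what is proved, stated in full; the proofs are below) =====
def Claim_equal_per_piece_moves : Prop := ∀ (pieces_set : List (Int × Int)), Dom_per_piece_moves pieces_set → Pre_per_piece_moves pieces_set → Spec_per_piece_moves pieces_set (per_piece_moves pieces_set)

-- ===== LEMMAS AND PROOFS =====

-- the occupied columns of row r / occupied rows of column c, in input order
def colsOf (pieces : List (Int × Int)) (r : Int) : List Int :=
  pieces.filterMap (fun q => if q.1 = r then some q.2 else none)

def rowsOf (pieces : List (Int × Int)) (c : Int) : List Int :=
  pieces.filterMap (fun q => if q.2 = c then some q.1 else none)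

lemma mem_colsOf (pieces : List (Int × Int)) (r x : Int) :
    x ∈ colsOf pieces r ↔ (r, x) ∈ pieces := by
  simp only [colsOf, List.mem_filterMap]
  constructor
  · rintro ⟨⟨a, b⟩, hq, h⟩
    by_cases h1 : a = r
    · subst h1
      simp at h
      subst h
      exact hq
    · simp [h1] at h
  · intro h
    exact ⟨(r, x), h, by simp⟩

lemma mem_rowsOf (pieces : List (Int × Int)) (c y : Int) :
    y ∈ rowsOf pieces c ↔ (y, c) ∈ pieces := by
  simp only [rowsOf, List.mem_filterMap]
  constructor
  · rintro ⟨⟨a, b⟩, hq, h⟩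
    by_cases h1 : b = c
    · subst h1
      simp at h
      subst h
      exact hq
    · simp [h1] at h
  · intro h
    exact ⟨(y, c), h, by simp⟩

lemma colsOf_nodup (pieces : List (Int × Int)) (hnd : pieces.Nodup) (r : Int) :
    (colsOf pieces r).Nodup := by
  apply hnd.filterMap
  intro a a' b h h'
  by_cases h1 : a.1 = r <;> by_cases h2 : a'.1 = r <;> simp [h1, h2] at h h'
  cases a; cases a'; simp_all

lemma rowsOf_nodup (pieces : List (Int × Int)) (hnd : pieces.Nodup) (c : Int) :
    (rowsOf pieces c).Nodup := by
  apply hnd.filterMap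
  intro a a' b h h'
  by_cases h1 : a.2 = c <;> by_cases h2 : a'.2 = c <;> simp [h1, h2] at h h'
  cases a; cases a'; simp_all

def norm11 (x : Int) : Int := if x < 0 then x + 11 else x

lemma maxD_nil (d : Int) : PySem.List.maxD ([] : List Int) (fun x => x) d = d := rfl

lemma maxD_eq_of (xs : List Int) (d m : Int) (hm : m ∈ xs) (hmax : ∀ y ∈ xs, y ≤ m) :
    PySem.List.maxD xs (fun x => x) d = m := by
  cases h : PySem.List.max? xs (fun x => x) with
  | none => exact absurd ((PySem.List.max?_eq_none_iff _ _).mp h ▸ hm) (by simp)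
  | some z =>
    have h1 : z ∈ xs := PySem.List.max?_mem h
    have h2 := PySem.List.max?_isMax h m hm
    have : PySem.List.maxD xs (fun x => x) d = z := by simp [PySem.List.maxD, h]
    rw [this]
    exact le_antisymm (hmax z h1) h2

lemma minD_nil (d : Int) : PySem.List.minD ([] : List Int) (fun x => x) d = d := rfl

lemma minD_eq_of (xs : List Int) (d m : Int) (hm : m ∈ xs) (hmin : ∀ y ∈ xs, m ≤ y) :
    PySem.List.minD xs (fun x => x) d = m := by
  cases h : PySem.List.min? xs (fun x => x) with
  | none => exact absurd ((PySem.List.min?_eq_none_iff _ _).mp h ▸ hm) (by simp)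
  | some z =>
    have h1 : z ∈ xs := PySem.List.min?_mem h
    have h2 := PySem.List.min?_isMin h m hm
    have : PySem.List.minD xs (fun x => x) d = z := by simp [PySem.List.minD, h]
    rw [this]
    exact le_antisymm h2 (hmin z h1)

lemma pyGetD_neg11 (xs : List (List Int)) (hlen : xs.length = 11) (i : Int)
    (h1 : -11 ≤ i) (h2 : i < 11) (d : List Int) :
    PySem.List.pyGetD xs i d = xs.getD (norm11 i).toNat d := by
  by_cases h : 0 ≤ i
  · rw [PySem.List.pyGetD_eq_getElem _ _ h (by omega)]
    rw [List.getD_eq_getElem _ _ (by unfold norm11; split_ifs <;> omega)]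
    congr 1
    unfold norm11
    split_ifs <;> omega
  · obtain ⟨k, hk, hk1, hk2⟩ : ∃ k : Nat, i = -((k : Nat) : Int) ∧ 0 < k ∧ k ≤ 11 :=
      ⟨(-i).toNat, by omega, by omega, by omega⟩
    subst hk
    rw [PySem.List.pyGetD_neg_natCast _ _ _ (by omega) (by omega)]
    rw [List.getD_eq_getElem _ _ (by unfold norm11; split_ifs <;> omega)]
    congr 1
    unfold norm11
    split_ifs <;> omega

lemma pySetD_neg11 (xs : List (List Int)) (hlen : xs.length = 11) (i : Int)
    (h1 : -11 ≤ i) (h2 : i < 11) (v : List Int) :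
    PySem.List.pySetD xs i v = xs.set (norm11 i).toNat v := by
  by_cases h : 0 ≤ i
  · rw [PySem.List.pySetD_of_nonneg _ _ h]
    congr 1
    unfold norm11
    split_ifs <;> omega
  · unfold PySem.List.pySetD PySem.List.pySet? PySem.List.pyIdx?
    split_ifs <;> simp_all
    congr 1
    unfold norm11
    split_ifs <;> omega

lemma norm11_inj (a b : Int) (ha : -11 ≤ a ∧ a < 11) (hb : -11 ≤ b ∧ b < 11)
    (h1 : a - b ≠ 11) (h2 : b - a ≠ 11) : norm11 a = norm11 b ↔ a = b := by
  unfold norm11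
  split_ifs <;> omega

lemma length_bucketAppend (xs : List (List Int)) (k v : Int) :
    (bucketAppend xs k v).length = xs.length := by
  simp [bucketAppend, PySem.List.length_pySetD]

lemma pyGetD_bucketAppend (xs : List (List Int)) (hlen : xs.length = 11) (k r v : Int)
    (hk : -11 ≤ k ∧ k < 11) (hr : -11 ≤ r ∧ r < 11) :
    PySem.List.pyGetD (bucketAppend xs k v) r ([] : List Int)
      = if norm11 r = norm11 k then PySem.List.pyGetD xs k [] ++ [v]
        else PySem.List.pyGetD xs r [] := by
  have hnk : (norm11 k).toNat < xs.length := by unfold norm11; split_ifs <;> omega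
  have hnr : (norm11 r).toNat < xs.length := by unfold norm11; split_ifs <;> omega
  rw [bucketAppend, pySetD_neg11 xs hlen k hk.1 hk.2]
  rw [pyGetD_neg11 _ (by simpa using hlen) r hr.1 hr.2]
  rw [pyGetD_neg11 xs hlen k hk.1 hk.2, pyGetD_neg11 xs hlen r hr.1 hr.2]
  rw [List.getD_eq_getElem _ _ (by simpa using hnr), List.getElem_set]
  have he : ((norm11 k).toNat = (norm11 r).toNat) ↔ (norm11 r = norm11 k) := by
    unfold norm11; split_ifs <;> omega
  rw [List.getD_eq_getElem _ _ hnr]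
  exact if_congr he rfl rfl

lemma length_foldl_bucketAppend (l : List (Int × Int)) (key val : Int × Int → Int)
    (acc : List (List Int)) :
    (l.foldl (fun a q => bucketAppend a (key q) (val q)) acc).length = acc.length := by
  induction l generalizing acc with
  | nil => rfl
  | cons p t ih => simp [List.foldl_cons, ih, length_bucketAppend]

lemma foldl_bucketAppend (l : List (Int × Int)) (key val : Int × Int → Int)
    (acc : List (List Int)) (hlen : acc.length = 11) (r : Int) (hr : -11 ≤ r ∧ r < 11)
    (hl : ∀ q ∈ l, -11 ≤ key q ∧ key q < 11) :
    PySem.List.pyGetD (l.foldl (fun a q => bucketAppend a (key q) (val q)) acc) r []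
      = PySem.List.pyGetD acc r []
        ++ l.filterMap (fun q => if norm11 (key q) = norm11 r then some (val q) else none) := by
  induction l generalizing acc with
  | nil => simp
  | cons p t ih =>
    simp only [List.foldl_cons, List.filterMap_cons]
    obtain ⟨hk0, hk1⟩ := hl p (by simp)
    rw [ih (bucketAppend acc (key p) (val p)) (by rw [length_bucketAppend]; exact hlen)
        (fun q hq => hl q (by simp [hq]))]
    rw [pyGetD_bucketAppend acc hlen (key p) r (val p) ⟨hk0, hk1⟩ hr]
    by_cases h : norm11 (key p) = norm11 r
    · rw [if_pos h.symm, if_pos h]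
      have hpg : PySem.List.pyGetD acc (key p) ([] : List Int) = PySem.List.pyGetD acc r [] := by
        rw [pyGetD_neg11 acc hlen (key p) hk0 hk1, pyGetD_neg11 acc hlen r hr.1 hr.2, h]
      rw [hpg]
      simp [List.append_assoc]
    · rw [if_neg (fun hh => h hh.symm), if_neg h]

lemma bucket_sorted (pieces : List (Int × Int)) (key val : Int × Int → Int) (r : Int)
    (hr : -11 ≤ r ∧ r < 11) (hall : ∀ q ∈ pieces, -11 ≤ key q ∧ key q < 11) :
    PySem.List.pyGetD ((pieces.foldl (fun a q => bucketAppend a (key q) (val q))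
        (List.replicate 11 ([] : List Int))).map (fun l => PySem.List.sorted l (fun x => x) false)) r []
      = PySem.List.sorted (pieces.filterMap
          (fun q => if norm11 (key q) = norm11 r then some (val q) else none)) (fun x => x) false := by
  have hlen := length_foldl_bucketAppend pieces key val (List.replicate 11 ([] : List Int))
  simp only [List.length_replicate] at hlen
  have hnr : (norm11 r).toNat < 11 := by unfold norm11; split_ifs <;> omega
  rw [pyGetD_neg11 _ (by simpa using hlen) r hr.1 hr.2]
  rw [List.getD_eq_getElem _ _ (by rw [List.length_map, hlen]; exact hnr)]
  rw [List.getElem_map]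
  congr 1
  have h2 := foldl_bucketAppend pieces key val (List.replicate 11 ([] : List Int))
    (by simp) r hr hall
  rw [pyGetD_neg11 _ (by simpa using hlen) r hr.1 hr.2] at h2
  rw [List.getD_eq_getElem _ _ (by rw [hlen]; exact hnr)] at h2
  rw [h2, pyGetD_neg11 _ (by simp) r hr.1 hr.2]
  rw [List.getD_eq_getElem _ _ (by simpa using hnr)]
  rw [List.getElem_replicate]
  simp

lemma sorted_strict (S : List Int) (hS : S.Nodup) :
    (PySem.List.sorted S (fun x => x) false).Pairwise (· < ·) := by
  have h1 := PySem.List.sorted_pairwise S (fun x => x)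
  have h2 : (PySem.List.sorted S (fun x => x) false).Nodup :=
    (PySem.List.sorted_perm S (fun x => x) false).nodup_iff.mpr hS
  exact (h1.and h2).imp (fun h => lt_of_le_of_ne h.1 h.2)

lemma axis_eq (S : List Int) (c : Int) (hnd : S.Nodup) (hcS : c ∈ S)
    (xsLo xsHi : List Int)
    (hLo : ∀ x : Int, x ∈ xsLo ↔ x ∈ S ∧ x < c)
    (hHi : ∀ x : Int, x ∈ xsHi ↔ x ∈ S ∧ c < x) :
    ((if (((PySem.List.index? (PySem.List.sorted S (fun x => x) false) c).getD 0 : Nat) : Int) > 0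
        then c - (PySem.List.pyGetD (PySem.List.sorted S (fun x => x) false)
          ((((PySem.List.index? (PySem.List.sorted S (fun x => x) false) c).getD 0 : Nat) : Int) - 1) 0 + 1)
        else c)
      = c - PySem.List.maxD xsLo (fun x => x) (-1) - 1)
    ∧ ((if (((PySem.List.index? (PySem.List.sorted S (fun x => x) false) c).getD 0 : Nat) : Int)
          < ((PySem.List.sorted S (fun x => x) false).length : Int) - 1
        then (PySem.List.pyGetD (PySem.List.sorted S (fun x => x) false)
          ((((PySem.List.index? (PySem.List.sorted S (fun x => x) false) c).getD 0 : Nat) : Int) + 1) 0 - 1) - c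
        else (11 - 1) - c)
      = PySem.List.minD xsHi (fun x => x) 11 - c - 1) := by
  have hpw := sorted_strict S hnd
  have hcL : c ∈ PySem.List.sorted S (fun x => x) false :=
    (PySem.List.mem_sorted S (fun x => x) false c).mpr hcS
  obtain ⟨l₁, l₂, hL⟩ := List.append_of_mem hcL
  have hmemL : ∀ x : Int, x ∈ l₁ ++ c :: l₂ ↔ x ∈ S := by
    intro x; rw [← hL]; exact PySem.List.mem_sorted S (fun x => x) false x
  rw [hL] at hpw ⊢
  rw [List.pairwise_append] at hpw
  have hnotmem : c ∉ l₁ := fun h => lt_irrefl c (hpw.2.2 c h c (List.mem_cons_self))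
  have hidx : PySem.List.index? (l₁ ++ c :: l₂) c = some l₁.length :=
    (PySem.List.index?_eq_some_iff _ _ _).mpr ⟨l₁, l₂, rfl, rfl, hnotmem⟩
  rw [hidx]
  simp only [Option.getD_some]
  constructor
  · -- LEFT
    rcases l₁.eq_nil_or_concat with rfl | ⟨l', m, hcm⟩
    · rw [if_neg (by simp)]
      have hnil : xsLo = [] := by
        rw [List.eq_nil_iff_forall_not_mem]
        intro x hx
        obtain ⟨hxS, hxc⟩ := (hLo x).mp hx
        rcases List.mem_append.mp ((hmemL x).mpr hxS) with h | h
        · simp at h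
        · rcases List.mem_cons.mp h with rfl | h
          · omega
          · have hpc := hpw.2.1; rw [List.pairwise_cons] at hpc
            exact absurd (hpc.1 x h) (by omega)
      rw [hnil, maxD_nil]
      ring
    · rw [List.concat_eq_append] at hcm
      subst hcm
      have hm1 : m ∈ l' ++ [m] := by simp
      have hmc : m < c := hpw.2.2 m hm1 c List.mem_cons_self
      rw [if_pos (by simp)]
      have hgl : PySem.List.pyGetD ((l' ++ [m]) ++ c :: l₂) ((((l' ++ [m]).length : Nat) : Int) - 1) 0 = m := by
        have he : (((l' ++ [m]).length : Nat) : Int) - 1 = ((l'.length : Nat) : Int) := by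
          simp
        rw [he, PySem.List.pyGetD_natCast]
        rw [List.append_assoc, List.singleton_append]
        rw [List.getD_append_right l' (m :: c :: l₂) 0 l'.length le_rfl]
        simp
      rw [hgl]
      have hmax : PySem.List.maxD xsLo (fun x => x) (-1) = m := by
        apply maxD_eq_of
        · exact (hLo m).mpr ⟨(hmemL m).mp (by simp), hmc⟩
        · intro y hy
          obtain ⟨hyS, hyc⟩ := (hLo y).mp hy
          rcases List.mem_append.mp ((hmemL y).mpr hyS) with h | h
          · rcases List.mem_append.mp h with h | h
            · have hp1 := hpw.1
              rw [List.pairwise_append] at hp1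
              exact le_of_lt (hp1.2.2 y h m (by simp))
            · simp at h; omega
          · rcases List.mem_cons.mp h with rfl | h
            · omega
            · have hpc := hpw.2.1; rw [List.pairwise_cons] at hpc
              exact absurd (hpc.1 y h) (by omega)
      rw [hmax]
      ring
  · -- RIGHT
    cases l₂ with
    | nil =>
      rw [if_neg (by simp)]
      have hnil : xsHi = [] := by
        rw [List.eq_nil_iff_forall_not_mem]
        intro x hx
        obtain ⟨hxS, hxc⟩ := (hHi x).mp hx
        rcases List.mem_append.mp ((hmemL x).mpr hxS) with h | h
        · exact absurd (hpw.2.2 x h c List.mem_cons_self) (by omega)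
        · simp at h; omega
      rw [hnil, minD_nil]
      ring
    | cons u t =>
      have hcu : c < u := by
        have hpc := hpw.2.1; rw [List.pairwise_cons] at hpc
        exact hpc.1 u (by simp)
      rw [if_pos (by simp; omega)]
      have hgu : PySem.List.pyGetD (l₁ ++ c :: u :: t) ((((l₁.length : Nat)) : Int) + 1) 0 = u := by
        have he : (((l₁.length : Nat)) : Int) + 1 = (((l₁.length + 1 : Nat)) : Int) := by push_cast; ring
        rw [he, PySem.List.pyGetD_natCast]
        rw [List.getD_append_right l₁ (c :: u :: t) 0 (l₁.length + 1) (by omega)]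
        simp
      rw [hgu]
      have hmin : PySem.List.minD xsHi (fun x => x) 11 = u := by
        apply minD_eq_of
        · exact (hHi u).mpr ⟨(hmemL u).mp (by simp), hcu⟩
        · intro y hy
          obtain ⟨hyS, hyc⟩ := (hHi y).mp hy
          rcases List.mem_append.mp ((hmemL y).mpr hyS) with h | h
          · exact absurd (hpw.2.2 y h c List.mem_cons_self) (by omega)
          · rcases List.mem_cons.mp h with rfl | h
            · omega
            · rcases List.mem_cons.mp h with rfl | h
              · omega
              · have hpc := hpw.2.1
                rw [List.pairwise_cons] at hpc
                have hc2 := hpc.2; rw [List.pairwise_cons] at hc2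
                exact le_of_lt (hc2.1 y h)
      rw [hmin]
      ring

-- ===== VERDICT (by name: the statement is the Claim_ definition above) =====
theorem per_piece_moves_spec : Claim_equal_per_piece_moves := by
  unfold Claim_equal_per_piece_moves
  intro pieces _hdom hpre
  obtain ⟨hrange0, hnd, halias⟩ := hpre
  have hrange : ∀ p ∈ pieces, (-11:Int) ≤ p.1 ∧ p.1 < 11 ∧ (-11:Int) ≤ p.2 ∧ p.2 < 11 := by
    intro p hp
    have := hrange0 p hp
    omega
  unfold Spec_per_piece_moves per_piece_moves per_piece_moves_alt
  simp only
  refine congrArg (fun d : PySem.Dict (Int × Int) Int => d.items.map (fun q => (q.1.1, q.1.2, q.2))) ?_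
  refine PySem.List.foldl_congr_mem _ _ _ _ ?_
  intro d p hp
  refine congrArg (PySem.Dict.insert d (p.1, p.2)) ?_
  obtain ⟨hr0, hr1, hc0, hc1⟩ := hrange p hp
  have hbr : PySem.List.pyGetD ((pieces.foldl (fun acc q => bucketAppend acc q.1 q.2)
        (List.replicate 11 ([] : List Int))).map (fun l => PySem.List.sorted l (fun x => x) false)) p.1 []
      = PySem.List.sorted (colsOf pieces p.1) (fun x => x) false := by
    rw [bucket_sorted pieces (fun q => q.1) (fun q => q.2) p.1 ⟨hr0, hr1⟩
      (fun q hq => ⟨(hrange q hq).1, (hrange q hq).2.1⟩)]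
    congr 1
    apply List.filterMap_congr
    intro q hq
    simp only [norm11_inj q.1 p.1 ⟨(hrange q hq).1, (hrange q hq).2.1⟩ ⟨hr0, hr1⟩
      (halias q hq p hp).1 (halias p hp q hq).1]
  have hbc : PySem.List.pyGetD ((pieces.foldl (fun acc q => bucketAppend acc q.2 q.1)
        (List.replicate 11 ([] : List Int))).map (fun l => PySem.List.sorted l (fun x => x) false)) p.2 []
      = PySem.List.sorted (rowsOf pieces p.2) (fun x => x) false := by
    rw [bucket_sorted pieces (fun q => q.2) (fun q => q.1) p.2 ⟨hc0, hc1⟩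
      (fun q hq => ⟨(hrange q hq).2.2.1, (hrange q hq).2.2.2⟩)]
    congr 1
    apply List.filterMap_congr
    intro q hq
    simp only [norm11_inj q.2 p.2 ⟨(hrange q hq).2.2.1, (hrange q hq).2.2.2⟩ ⟨hc0, hc1⟩
      (halias q hq p hp).2 (halias p hp q hq).2]
  have hreplZ : PySem.List.pyGetD (List.replicate 11 ([] : List Int)) p.1 ([] : List Int) = [] := by
    rw [pyGetD_neg11 _ (by simp) p.1 hr0 hr1]
    rw [List.getD_eq_getElem _ _ (by simp only [List.length_replicate]; unfold norm11; split_ifs <;> omega)]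
    rw [List.getElem_replicate]
  have hreplZ2 : PySem.List.pyGetD (List.replicate 11 ([] : List Int)) p.2 ([] : List Int) = [] := by
    rw [pyGetD_neg11 _ (by simp) p.2 hc0 hc1]
    rw [List.getD_eq_getElem _ _ (by simp only [List.length_replicate]; unfold norm11; split_ifs <;> omega)]
    rw [List.getElem_replicate]
  have hbr' : PySem.List.pyGetD (pieces.foldl (fun acc q => bucketAppend acc q.1 q.2)
        (List.replicate 11 ([] : List Int))) p.1 []
      = colsOf pieces p.1 := by
    rw [foldl_bucketAppend pieces (fun q => q.1) (fun q => q.2) (List.replicate 11 ([] : List Int))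
      (by simp) p.1 ⟨hr0, hr1⟩ (fun q hq => ⟨(hrange q hq).1, (hrange q hq).2.1⟩)]
    rw [hreplZ, List.nil_append]
    unfold colsOf
    apply List.filterMap_congr
    intro q hq
    simp only [norm11_inj q.1 p.1 ⟨(hrange q hq).1, (hrange q hq).2.1⟩ ⟨hr0, hr1⟩
      (halias q hq p hp).1 (halias p hp q hq).1]
  have hbc' : PySem.List.pyGetD (pieces.foldl (fun acc q => bucketAppend acc q.2 q.1)
        (List.replicate 11 ([] : List Int))) p.2 []
      = rowsOf pieces p.2 := by
    rw [foldl_bucketAppend pieces (fun q => q.2) (fun q => q.1) (List.replicate 11 ([] : List Int))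
      (by simp) p.2 ⟨hc0, hc1⟩ (fun q hq => ⟨(hrange q hq).2.2.1, (hrange q hq).2.2.2⟩)]
    rw [hreplZ2, List.nil_append]
    unfold rowsOf
    apply List.filterMap_congr
    intro q hq
    simp only [norm11_inj q.2 p.2 ⟨(hrange q hq).2.2.1, (hrange q hq).2.2.2⟩ ⟨hc0, hc1⟩
      (halias q hq p hp).2 (halias p hp q hq).2]
  rw [hbr, hbc, hbr', hbc']
  have hpmem : ((p.1, p.2) : Int × Int) ∈ pieces := hp
  have hA := axis_eq (colsOf pieces p.1) p.2 (colsOf_nodup pieces hnd p.1)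
    ((mem_colsOf pieces p.1 p.2).mpr hpmem)
    ((colsOf pieces p.1).filter (fun c2 => decide (c2 < p.2)))
    ((colsOf pieces p.1).filter (fun c2 => decide (c2 > p.2)))
    (fun x => by simp [List.mem_filter])
    (fun x => by simp [List.mem_filter])
  have hV := axis_eq (rowsOf pieces p.2) p.1 (rowsOf_nodup pieces hnd p.2)
    ((mem_rowsOf pieces p.2 p.1).mpr hpmem)
    ((rowsOf pieces p.2).filter (fun r2 => decide (r2 < p.1)))
    ((rowsOf pieces p.2).filter (fun r2 => decide (r2 > p.1)))
    (fun x => by simp [List.mem_filter])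
    (fun x => by simp [List.mem_filter])
  rw [hA.1, hA.2, hV.1, hV.2]
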